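-- pv_equiv track=rewrite | github.com/WAZYHZY444/project1 | test01.py | beauty_max
-- ===== SOURCE A (Python) =====
-- from collections import Counter
--
-- def beauty_max(s):
--     n=len(s)
--     result=0
--     for i in range(n):
--         count=Counter()
--         for j in range(i,n):
--             count[s[j]]+=1
--             max_count=max(count.values())
--             min_count=min(count.values())
--             result=max(result,max_count-min_count)
--     return result
-- ===== SOURCE B (Python) =====
-- def beauty_max(s):
--     # For each start, extend the window one char at a time, maintaining the max
--     # and min frequency in O(1) per step via a count-of-counts bucket table,
--     # instead of rescanning all counter values at every step.
--     best = 0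
--     for i in range(len(s)):
--         freq = {}
--         bucket = {}
--         maxc = 0
--         minc = 0
--         for ch in s[i:]:
--             k = freq.get(ch, 0)
--             freq[ch] = k + 1
--             if k:
--                 bucket[k] -= 1
--             bucket[k + 1] = bucket.get(k + 1, 0) + 1
--             if k == 0:
--                 minc = 1
--             elif k == minc and bucket[k] == 0:
--                 minc = k + 1
--             if k + 1 > maxc:
--                 maxc = k + 1
--             if maxc - minc > best:
--                 best = maxc - minc
--     return best
-- ===== Notes on version B (the rewrite author's own statement) =====
-- stated objective: faster
-- what changed: Instead of rebuilding max/min of all counter values at every window extension, B maintains the max and min frequency incrementally with a count-of-counts bucket table, O(1) per extension.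
import Mathlib
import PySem

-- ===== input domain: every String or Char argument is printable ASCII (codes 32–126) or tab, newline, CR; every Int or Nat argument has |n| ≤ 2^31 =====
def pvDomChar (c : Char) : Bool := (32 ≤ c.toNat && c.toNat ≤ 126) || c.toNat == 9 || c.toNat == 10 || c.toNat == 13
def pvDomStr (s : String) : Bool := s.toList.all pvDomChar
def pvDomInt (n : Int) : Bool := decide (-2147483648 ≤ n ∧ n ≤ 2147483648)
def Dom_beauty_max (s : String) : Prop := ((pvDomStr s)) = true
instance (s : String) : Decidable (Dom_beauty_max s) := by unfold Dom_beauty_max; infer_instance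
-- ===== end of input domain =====

-- B replaces A's per-step rescan of all counter values with an incrementally
-- maintained max/min frequency (count-of-counts buckets): the per-extension
-- O(distinct chars) scan disappears.

-- ===== PORT A =====
-- one step of A's inner loop: count[s[j]] += 1; result = max(result, max(values)-min(values))
-- count.values is nonempty when this runs, so the `.getD 0` defaults are unreachable
def beautyStepA (st : PySem.Dict Char Int × Int) (c : Char) : PySem.Dict Char Int × Int :=
  let count := st.1.modify c 0 (· + 1)
  let max_count := (PySem.List.max? count.values (fun x => x)).getD 0
  let min_count := (PySem.List.min? count.values (fun x => x)).getD 0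
  (count, max st.2 (max_count - min_count))

def beauty_max (s : String) : Int :=
  let l := s.toList
  let n : Int := PySem.List.len l
  (PySem.List.pyRange 0 n 1).foldl (fun result i =>
    ((PySem.List.pyRange i n 1).foldl
      (fun st j => beautyStepA st (PySem.List.pyGetD l j ' '))
      (PySem.Dict.empty, result)).2) 0

-- ===== PORT B =====
-- one step of B's inner loop; state = (freq, bucket, maxc, minc, best).
-- Python's `bucket[k] -= 1` runs only with the key present (k > 0 means some
-- char has count k), so `modify` with default 0 is exact there.
def beautyStepB (st : PySem.Dict Char Int × PySem.Dict Int Int × Int × Int × Int)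
    (ch : Char) : PySem.Dict Char Int × PySem.Dict Int Int × Int × Int × Int :=
  let k := st.1.getD ch 0
  let freq := st.1.insert ch (k + 1)
  let bucket := if k ≠ 0 then st.2.1.modify k 0 (· - 1) else st.2.1
  let bucket := bucket.modify (k + 1) 0 (· + 1)
  let minc := if k = 0 then 1
              else if k = st.2.2.2.1 ∧ bucket.getD k 0 = 0 then k + 1 else st.2.2.2.1
  let maxc := if k + 1 > st.2.2.1 then k + 1 else st.2.2.1
  let best := if maxc - minc > st.2.2.2.2 then maxc - minc else st.2.2.2.2
  (freq, bucket, maxc, minc, best)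

def beauty_max_alt (s : String) : Int :=
  let l := s.toList
  (PySem.List.pyRange 0 (PySem.List.len l) 1).foldl (fun best i =>
    ((PySem.List.slice l (some i) none).foldl beautyStepB
      (PySem.Dict.empty, PySem.Dict.empty, 0, 0, best)).2.2.2.2) 0

-- ===== PRECONDITION & SPEC =====
def Spec_beauty_max (s : String) (out : Int) : Prop := out = beauty_max_alt s
instance (s : String) (out : Int) : Decidable (Spec_beauty_max s out) := by unfold Spec_beauty_max; infer_instance

-- ===== CLAIM (what is proved, stated in full; the proofs are below) =====
def Claim_equal_beauty_max : Prop := ∀ (s : String), Dom_beauty_max s → Spec_beauty_max s (beauty_max s)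

-- ===== LEMMAS AND PROOFS =====

-- the multiset of frequencies of the prefix p, as Python's count.values() lists it
def pvVals (p : List Char) : List Int :=
  (PySem.Set.ofList p).map (fun k => (p.count k : Int))

-- Python's max(l) / min(l) on a nonempty list (0 on [] — never used there)
def pvMax : List Int → Int
  | [] => 0
  | x :: t => t.foldl max x

def pvMin : List Int → Int
  | [] => 0
  | x :: t => t.foldl min x

-- the common reference recursion: extend the window char by char, taking
-- max(best, max freq - min freq) at every step
def pvRef (p tl : List Char) (r : Int) : Int :=
  match tl with
  | [] => r
  | c :: tl' => pvRef (p ++ [c]) tl' (max r (pvMax (pvVals (p ++ [c])) - pvMin (pvVals (p ++ [c]))))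

theorem foldl_max_swap (t : List Int) : ∀ x y, t.foldl max (max x y) = max x (t.foldl max y) := by
  induction t with
  | nil => intro x y; rfl
  | cons c t ih =>
    intro x y
    simp only [List.foldl_cons]
    rw [ih (max x y) c, ih y c, max_assoc]

theorem foldl_min_swap (t : List Int) : ∀ x y, t.foldl min (min x y) = min x (t.foldl min y) := by
  induction t with
  | nil => intro x y; rfl
  | cons c t ih =>
    intro x y
    simp only [List.foldl_cons]
    rw [ih (min x y) c, ih y c, min_assoc]

theorem foldl_max_extract (l1 l2 : List Int) : ∀ a x, (l1 ++ x :: l2).foldl max a = max x ((l1 ++ l2).foldl max a) := by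
  induction l1 with
  | nil => intro a x; simp only [List.nil_append, List.foldl_cons]; rw [max_comm a x, foldl_max_swap]
  | cons b l1 ih => intro a x; simp only [List.cons_append, List.foldl_cons]; exact ih _ x

theorem foldl_min_extract (l1 l2 : List Int) : ∀ a x, (l1 ++ x :: l2).foldl min a = min x ((l1 ++ l2).foldl min a) := by
  induction l1 with
  | nil => intro a x; simp only [List.nil_append, List.foldl_cons]; rw [min_comm a x, foldl_min_swap]
  | cons b l1 ih => intro a x; simp only [List.cons_append, List.foldl_cons]; exact ih _ x

theorem pvMax_extract (l1 l2 : List Int) (x : Int) (h : l1 ++ l2 ≠ []) :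
    pvMax (l1 ++ x :: l2) = max x (pvMax (l1 ++ l2)) := by
  cases l1 with
  | nil =>
    cases l2 with
    | nil => exact absurd rfl h
    | cons y t =>
      simp only [List.nil_append, pvMax, List.foldl_cons]
      rw [foldl_max_swap]
  | cons a l1 =>
    simp only [List.cons_append, pvMax]
    exact foldl_max_extract l1 l2 a x

theorem pvMin_extract (l1 l2 : List Int) (x : Int) (h : l1 ++ l2 ≠ []) :
    pvMin (l1 ++ x :: l2) = min x (pvMin (l1 ++ l2)) := by
  cases l1 with
  | nil =>
    cases l2 with
    | nil => exact absurd rfl h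
    | cons y t =>
      simp only [List.nil_append, pvMin, List.foldl_cons]
      rw [foldl_min_swap]
  | cons a l1 =>
    simp only [List.cons_append, pvMin]
    exact foldl_min_extract l1 l2 a x

theorem foldl_min_le_init (t : List Int) : ∀ a, t.foldl min a ≤ a := by
  induction t with
  | nil => intro a; simp
  | cons c t ih =>
    intro a
    simp only [List.foldl_cons]
    exact le_trans (ih (min a c)) (min_le_left a c)

theorem foldl_min_le_mem (t : List Int) : ∀ a v, v ∈ t → t.foldl min a ≤ v := by
  induction t with
  | nil => intro a v hv; simp at hv
  | cons c t ih =>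
    intro a v hv
    rcases List.mem_cons.mp hv with h | h
    · subst h
      exact le_trans (foldl_min_le_init t (min a v)) (min_le_right a v)
    · exact ih (min a c) v h

theorem pvMin_le_mem (l : List Int) (v : Int) (hv : v ∈ l) : pvMin l ≤ v := by
  cases l with
  | nil => simp at hv
  | cons x t =>
    rcases List.mem_cons.mp hv with h | h
    · subst h; exact foldl_min_le_init t v
    · exact foldl_min_le_mem t x v h

theorem le_foldl_min (t : List Int) : ∀ a b, a ≤ b → (∀ v ∈ t, a ≤ v) → a ≤ t.foldl min b := by
  induction t with
  | nil => intro a b hab _; simpa using hab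
  | cons c t ih =>
    intro a b hab h
    simp only [List.foldl_cons]
    exact ih a (min b c) (le_min hab (h c (List.mem_cons_self))) (fun v hv => h v (List.mem_cons_of_mem c hv))

theorem le_pvMin (l : List Int) (a : Int) (h : ∀ v ∈ l, a ≤ v) (hne : l ≠ []) : a ≤ pvMin l := by
  cases l with
  | nil => exact absurd rfl hne
  | cons x t =>
    exact le_foldl_min t a x (h x (List.mem_cons_self)) (fun v hv => h v (List.mem_cons_of_mem x hv))

theorem foldl_max_ge_init (t : List Int) : ∀ a, a ≤ t.foldl max a := by
  induction t with
  | nil => intro a; simp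
  | cons c t ih =>
    intro a
    simp only [List.foldl_cons]
    exact le_trans (le_max_left a c) (ih (max a c))

theorem foldl_max_ge_mem (t : List Int) : ∀ a v, v ∈ t → v ≤ t.foldl max a := by
  induction t with
  | nil => intro a v hv; simp at hv
  | cons c t ih =>
    intro a v hv
    rcases List.mem_cons.mp hv with h | h
    · subst h
      exact le_trans (le_max_right a v) (foldl_max_ge_init t (max a v))
    · exact ih (max a c) v h

theorem mem_le_pvMax (l : List Int) (v : Int) (hv : v ∈ l) : v ≤ pvMax l := by
  cases l with
  | nil => simp at hv
  | cons x t =>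
    rcases List.mem_cons.mp hv with h | h
    · subst h; exact foldl_max_ge_init t v
    · exact foldl_max_ge_mem t x v h

theorem one_le_pvMax (l : List Int) (h : ∀ v ∈ l, 1 ≤ v) (hne : l ≠ []) : 1 ≤ pvMax l := by
  cases l with
  | nil => exact absurd rfl hne
  | cons x t =>
    exact le_trans (h x List.mem_cons_self) (mem_le_pvMax (x :: t) x List.mem_cons_self)

-- evaluation lemma: beautyStepB on an explicit state, with max/min written via `max`
theorem stepB_eval (freq : PySem.Dict Char Int) (bucket : PySem.Dict Int Int)
    (mx mn r : Int) (ch : Char) :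
    beautyStepB (freq, bucket, mx, mn, r) ch =
      (freq.insert ch (freq.getD ch 0 + 1),
       (if freq.getD ch 0 ≠ 0 then bucket.modify (freq.getD ch 0) 0 (· - 1) else bucket).modify
         (freq.getD ch 0 + 1) 0 (· + 1),
       max mx (freq.getD ch 0 + 1),
       (if freq.getD ch 0 = 0 then 1
        else if freq.getD ch 0 = mn ∧
            ((if freq.getD ch 0 ≠ 0 then bucket.modify (freq.getD ch 0) 0 (· - 1) else bucket).modify
              (freq.getD ch 0 + 1) 0 (· + 1)).getD (freq.getD ch 0) 0 = 0 then
          freq.getD ch 0 + 1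
        else mn),
       max r
         (max mx (freq.getD ch 0 + 1) -
          (if freq.getD ch 0 = 0 then 1
           else if freq.getD ch 0 = mn ∧
               ((if freq.getD ch 0 ≠ 0 then bucket.modify (freq.getD ch 0) 0 (· - 1) else bucket).modify
                 (freq.getD ch 0 + 1) 0 (· + 1)).getD (freq.getD ch 0) 0 = 0 then
             freq.getD ch 0 + 1
           else mn))) := by
  simp only [beautyStepB, Prod.mk.injEq, true_and]
  constructor
  · simp only [max_def]
    split_ifs <;> omega
  · simp only [max_def]
    split_ifs <;> omega

theorem values_counter (xs : List Char) : (PySem.Dict.counter xs).values = pvVals xs := by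
  simp [PySem.Dict.values, PySem.Dict.items_counter, pvVals, List.map_map, Function.comp]

theorem pvVals_ne_nil (p : List Char) (hp : p ≠ []) : pvVals p ≠ [] := by
  cases p with
  | nil => exact absurd rfl hp
  | cons a t =>
    have ha : a ∈ PySem.Set.ofList (a :: t) := (PySem.Set.mem_ofList _ _).mpr List.mem_cons_self
    have : PySem.Set.ofList (a :: t) ≠ [] := List.ne_nil_of_mem ha
    simpa [pvVals, List.map_eq_nil_iff] using this

theorem pvVals_pos (p : List Char) (v : Int) (hv : v ∈ pvVals p) : 1 ≤ v := by
  simp only [pvVals, List.mem_map] at hv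
  obtain ⟨k, hk, hkv⟩ := hv
  have hkp : k ∈ p := (PySem.Set.mem_ofList _ _).mp hk
  have : 1 ≤ p.count k := List.count_pos_iff.mpr hkp
  omega

theorem set_append_not_mem (p : List Char) (c : Char) (hc : c ∉ p) :
    PySem.Set.ofList (p ++ [c]) = PySem.Set.ofList p ++ [c] := by
  have hcs : c ∉ PySem.Set.ofList p := fun h => hc ((PySem.Set.mem_ofList _ _).mp h)
  rw [PySem.Set.ofList_eq_foldl, List.foldl_append, ← PySem.Set.ofList_eq_foldl]
  simp only [List.foldl_cons, List.foldl_nil, PySem.Set.add]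
  simp [hcs]

theorem set_append_mem (p : List Char) (c : Char) (hc : c ∈ p) :
    PySem.Set.ofList (p ++ [c]) = PySem.Set.ofList p := by
  have hcs : c ∈ PySem.Set.ofList p := (PySem.Set.mem_ofList _ _).mpr hc
  rw [PySem.Set.ofList_eq_foldl, List.foldl_append, ← PySem.Set.ofList_eq_foldl]
  simp only [List.foldl_cons, List.foldl_nil, PySem.Set.add]
  simp [hcs]

theorem count_append_singleton_self (p : List Char) (c : Char) :
    (p ++ [c]).count c = p.count c + 1 := by
  simp [List.count_append]

theorem count_append_singleton_ne (p : List Char) (c x : Char) (hx : x ≠ c) :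
    (p ++ [c]).count x = p.count x := by
  simp [List.count_append, Ne.symm hx]

theorem pvVals_append_not_mem (p : List Char) (c : Char) (hc : c ∉ p) :
    pvVals (p ++ [c]) = pvVals p ++ [1] := by
  simp only [pvVals, set_append_not_mem p c hc, List.map_append, List.map_cons, List.map_nil]
  congr 1
  · apply List.map_congr_left
    intro k hk
    have hkp : k ∈ p := (PySem.Set.mem_ofList _ _).mp hk
    have hkc : k ≠ c := fun h => hc (h ▸ hkp)
    rw [count_append_singleton_ne p c k hkc]
  · have h0 : p.count c = 0 := List.count_eq_zero.mpr hc
    rw [count_append_singleton_self]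
    simp [h0]

theorem pvVals_append_mem (p : List Char) (c : Char) (hc : c ∈ p) :
    ∃ A1 A2 : List Int,
      pvVals p = A1 ++ ((p.count c : Int)) :: A2 ∧
      pvVals (p ++ [c]) = A1 ++ ((p.count c : Int) + 1) :: A2 := by
  have hcs : c ∈ PySem.Set.ofList p := (PySem.Set.mem_ofList _ _).mpr hc
  obtain ⟨s1, s2, hs⟩ := List.append_of_mem hcs
  have hnd : (PySem.Set.ofList p).Nodup := PySem.Set.nodup_ofList p
  rw [hs, List.nodup_middle, List.nodup_cons] at hnd
  have hcns : c ∉ s1 ++ s2 := hnd.1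
  refine ⟨s1.map (fun k => ((p.count k : Int))), s2.map (fun k => ((p.count k : Int))), ?_, ?_⟩
  · simp [pvVals, hs]
  · simp only [pvVals, set_append_mem p c hc, hs, List.map_append, List.map_cons]
    have hmap : ∀ t : List Char, (∀ x ∈ t, x ≠ c) →
        t.map (fun k => (((p ++ [c]).count k : Int))) = t.map (fun k => ((p.count k : Int))) := by
      intro t ht
      apply List.map_congr_left
      intro k hk
      rw [count_append_singleton_ne p c k (ht k hk)]
    rw [hmap s1 (fun x hx h => hcns (h ▸ List.mem_append_left s2 hx)),
        hmap s2 (fun x hx h => hcns (h ▸ List.mem_append_right s1 hx)),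
        count_append_singleton_self]
    push_cast
    ring_nf

-- A's inner loop computes the reference recursion
theorem loopA (tl : List Char) : ∀ (p : List Char) (r : Int),
    (tl.foldl beautyStepA (PySem.Dict.counter p, r)).2 = pvRef p tl r := by
  induction tl with
  | nil => intro p r; rfl
  | cons c tl ih =>
    intro p r
    have hstep : beautyStepA (PySem.Dict.counter p, r) c =
        (PySem.Dict.counter (p ++ [c]),
         max r (pvMax (pvVals (p ++ [c])) - pvMin (pvVals (p ++ [c])))) := by
      have hcnt : (PySem.Dict.counter p).modify c 0 (· + 1) = PySem.Dict.counter (p ++ [c]) :=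
        (PySem.Dict.counter_append_singleton p c).symm
      have hne : pvVals (p ++ [c]) ≠ [] := pvVals_ne_nil _ (by simp)
      cases hv : pvVals (p ++ [c]) with
      | nil => exact absurd hv hne
      | cons x t =>
        simp only [beautyStepA, hcnt, values_counter, hv,
          PySem.List.max?_id_cons, PySem.List.min?_id_cons, Option.getD_some]
        rfl
    simp only [List.foldl_cons, hstep, ih, pvRef]

-- one step of B's loop preserves the bucket invariant and tracks max/min exactly
theorem stepB_spec (p : List Char) (c : Char) (freq : PySem.Dict Char Int)
    (bucket : PySem.Dict Int Int) (r : Int)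
    (hf : ∀ x, freq.getD x 0 = ((p.count x : Int)))
    (hb : ∀ v, bucket.getD v 0 = (((pvVals p).count v : Int))) :
    ∃ freq' bucket',
      beautyStepB (freq, bucket, pvMax (pvVals p), pvMin (pvVals p), r) c =
        (freq', bucket', pvMax (pvVals (p ++ [c])), pvMin (pvVals (p ++ [c])),
         max r (pvMax (pvVals (p ++ [c])) - pvMin (pvVals (p ++ [c])))) ∧
      (∀ x, freq'.getD x 0 = (((p ++ [c]).count x : Int))) ∧
      (∀ v, bucket'.getD v 0 = (((pvVals (p ++ [c])).count v : Int))) := by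
  have hk : freq.getD c 0 = ((p.count c : Int)) := hf c
  rw [stepB_eval, hk]
  by_cases hcp : c ∈ p
  · -- c already in the window: some char has count K := p.count c ≥ 1
    obtain ⟨A1, A2, hd1, hd2⟩ := pvVals_append_mem p c hcp
    have hKpos : 1 ≤ p.count c := List.count_pos_iff.mpr hcp
    have hkne : ¬((p.count c : Int) = 0) := by omega
    have hmem12 : ∀ v ∈ A1 ++ A2, v ∈ pvVals p := by
      intro v hv
      rw [hd1]
      rcases List.mem_append.mp hv with h | h
      · exact List.mem_append_left _ h
      · exact List.mem_append_right _ (List.mem_cons_of_mem _ h)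
    have hbexpr :
        ((if ((p.count c : Int)) ≠ 0 then bucket.modify ((p.count c : Int)) 0 (· - 1) else bucket).modify
          (((p.count c : Int)) + 1) 0 (· + 1)).getD ((p.count c : Int)) 0 =
        (((A1 ++ A2).count ((p.count c : Int)) : Int)) := by
      rw [if_pos hkne, PySem.Dict.getD_modify, if_neg (by omega), PySem.Dict.getD_modify,
          if_pos rfl, hb, hd1]
      have : (A1 ++ ((p.count c : Int)) :: A2).count ((p.count c : Int)) =
          (A1 ++ A2).count ((p.count c : Int)) + 1 := by
        simp [List.count_append]
        omega
      rw [this]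
      push_cast
      ring
    have hmaxc : max (pvMax (pvVals p)) (((p.count c : Int)) + 1) = pvMax (pvVals (p ++ [c])) := by
      rcases List.eq_nil_or_concat' (A1 ++ A2) with h12 | _
      · obtain ⟨h1, h2⟩ := List.append_eq_nil_iff.mp h12
        subst h1; subst h2
        simp only [List.nil_append] at hd1 hd2
        rw [hd1, hd2]
        simp [pvMax]
      · have h12 : A1 ++ A2 ≠ [] := by
          rename_i h
          obtain ⟨_, _, h⟩ := h
          simp [h]
        rw [hd1, hd2, pvMax_extract A1 A2 _ h12, pvMax_extract A1 A2 _ h12]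
        simp only [max_def]
        split_ifs <;> omega
    have hminc :
        (if ((p.count c : Int)) = pvMin (pvVals p) ∧
            ((if ((p.count c : Int)) ≠ 0 then bucket.modify ((p.count c : Int)) 0 (· - 1) else bucket).modify
              (((p.count c : Int)) + 1) 0 (· + 1)).getD ((p.count c : Int)) 0 = 0 then
          ((p.count c : Int)) + 1
         else pvMin (pvVals p)) = pvMin (pvVals (p ++ [c])) := by
      rw [hbexpr]
      rcases List.eq_nil_or_concat' (A1 ++ A2) with h12 | _
      · obtain ⟨h1, h2⟩ := List.append_eq_nil_iff.mp h12
        subst h1; subst h2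
        simp only [List.nil_append] at hd1 hd2
        rw [hd1, hd2]
        simp [pvMin]
      · have h12 : A1 ++ A2 ≠ [] := by
          rename_i h
          obtain ⟨_, _, h⟩ := h
          simp [h]
        rw [hd1, hd2, pvMin_extract A1 A2 _ h12, pvMin_extract A1 A2 _ h12]
        by_cases hcnt : (A1 ++ A2).count ((p.count c : Int)) = 0
        · by_cases hmin : ((p.count c : Int)) = min ((p.count c : Int)) (pvMin (A1 ++ A2))
          · rw [if_pos ⟨hmin, by simp [hcnt]⟩]
            have hnotin : ((p.count c : Int)) ∉ A1 ++ A2 := by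
              intro h
              have := List.count_pos_iff.mpr h
              omega
            have hge : ∀ v ∈ A1 ++ A2, ((p.count c : Int)) + 1 ≤ v := by
              intro v hv
              have h1 : min ((p.count c : Int)) (pvMin (A1 ++ A2)) ≤ v := by
                calc min ((p.count c : Int)) (pvMin (A1 ++ A2)) ≤ pvMin (A1 ++ A2) := min_le_right _ _
                _ ≤ v := pvMin_le_mem _ v hv
              have h2 : v ≠ ((p.count c : Int)) := fun h => hnotin (h ▸ hv)
              omega
            have : ((p.count c : Int)) + 1 ≤ pvMin (A1 ++ A2) :=
              le_pvMin _ _ hge h12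
            simp only [min_def]
            split_ifs <;> omega
          · rw [if_neg (fun h => hmin h.1)]
            have hle : pvMin (A1 ++ A2) ≤ ((p.count c : Int)) := by
              rcases min_cases ((p.count c : Int)) (pvMin (A1 ++ A2)) with ⟨h, _⟩ | ⟨h, h'⟩
              · exact absurd h.symm hmin
              · exact h'.le
            simp only [min_def]
            split_ifs <;> omega
        · have hin : ((p.count c : Int)) ∈ A1 ++ A2 := by
            have := Nat.pos_of_ne_zero hcnt
            exact List.count_pos_iff.mp this
          have hle : pvMin (A1 ++ A2) ≤ ((p.count c : Int)) := pvMin_le_mem _ _ hin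
          rw [if_neg (fun h => hcnt (by exact_mod_cast h.2))]
          simp only [min_def]
          split_ifs <;> omega
    refine ⟨freq.insert c (((p.count c : Int)) + 1),
      (bucket.modify ((p.count c : Int)) 0 (· - 1)).modify (((p.count c : Int)) + 1) 0 (· + 1),
      ?_, ?_, ?_⟩
    · rw [hmaxc, hminc, if_neg hkne, if_pos hkne]
    · intro x
      rw [PySem.Dict.getD_insert]
      by_cases hx : x = c
      · subst hx
        rw [if_pos rfl, count_append_singleton_self]
        push_cast; ring
      · rw [if_neg hx, hf x, count_append_singleton_ne p c x hx]
    · intro v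
      rw [PySem.Dict.getD_modify]
      by_cases hv1 : v = ((p.count c : Int)) + 1
      · rw [if_pos hv1, PySem.Dict.getD_modify, if_neg (by omega), hb, hd1, hd2, hv1]
        have h1 : (A1 ++ (((p.count c : Int)) + 1) :: A2).count (((p.count c : Int)) + 1) =
            (A1 ++ A2).count (((p.count c : Int)) + 1) + 1 := by simp [List.count_append]; omega
        have h2 : (A1 ++ ((p.count c : Int)) :: A2).count (((p.count c : Int)) + 1) =
            (A1 ++ A2).count (((p.count c : Int)) + 1) := by simp [List.count_append]
        rw [h1, h2]
        push_cast; ring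
      · rw [if_neg hv1, PySem.Dict.getD_modify]
        by_cases hv0 : v = ((p.count c : Int))
        · rw [if_pos hv0, hb, hd1, hd2, hv0]
          have h1 : (A1 ++ ((p.count c : Int)) :: A2).count ((p.count c : Int)) =
              (A1 ++ A2).count ((p.count c : Int)) + 1 := by simp [List.count_append]; omega
          have h2 : (A1 ++ (((p.count c : Int)) + 1) :: A2).count ((p.count c : Int)) =
              (A1 ++ A2).count ((p.count c : Int)) := by simp [List.count_append]
          rw [h1, h2]
          push_cast; ring
        · rw [if_neg hv0, hb, hd1, hd2]
          have h1 : (A1 ++ ((p.count c : Int)) :: A2).count v = (A1 ++ A2).count v := by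
            simp [List.count_append, Ne.symm hv0]
          have h2 : (A1 ++ (((p.count c : Int)) + 1) :: A2).count v = (A1 ++ A2).count v := by
            simp [List.count_append, Ne.symm hv1]
          rw [h1, h2]
  · -- new char: its count goes 0 → 1
    have h0 : p.count c = 0 := List.count_eq_zero.mpr hcp
    have hv : pvVals (p ++ [c]) = pvVals p ++ [1] := pvVals_append_not_mem p c hcp
    rw [h0]
    norm_num
    have hmaxc : max (pvMax (pvVals p)) 1 = pvMax (pvVals (p ++ [c])) := by
      rw [hv]
      by_cases hp : p = []
      · subst hp
        simp [pvVals, PySem.Set.ofList_eq_foldl, pvMax]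
      · have hne := pvVals_ne_nil p hp
        have h1 : 1 ≤ pvMax (pvVals p) := one_le_pvMax _ (pvVals_pos p) hne
        have := pvMax_extract (pvVals p) [] 1 (by simpa using hne)
        simp only [List.append_nil] at this
        rw [this]
        simp only [max_def]
        split_ifs <;> omega
    have hminc : (1 : Int) = pvMin (pvVals (p ++ [c])) := by
      rw [hv]
      by_cases hp : p = []
      · subst hp
        simp [pvVals, PySem.Set.ofList_eq_foldl, pvMin]
      · have hne := pvVals_ne_nil p hp
        have h1 : 1 ≤ pvMin (pvVals p) := le_pvMin _ _ (pvVals_pos p) hne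
        have := pvMin_extract (pvVals p) [] 1 (by simpa using hne)
        simp only [List.append_nil] at this
        rw [this]
        simp only [min_def]
        split_ifs <;> omega
    refine ⟨freq.insert c 1, bucket.modify 1 0 (· + 1), ?_, ?_, ?_⟩
    · rw [hmaxc, ← hminc]
      exact ⟨rfl, rfl, rfl, rfl, rfl⟩
    · intro x
      rw [PySem.Dict.getD_insert]
      by_cases hx : x = c
      · subst hx
        rw [if_pos rfl]
        simp [h0]
      · rw [if_neg hx, hf x]
        simp [Ne.symm hx]
    · intro v
      rw [PySem.Dict.getD_modify]
      by_cases hv1 : v = 1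
      · rw [if_pos hv1, hb, hv, hv1]
        have : (pvVals p ++ [(1 : Int)]).count 1 = (pvVals p).count 1 + 1 := by
          simp [List.count_append]
        rw [this]
        push_cast; ring
      · rw [if_neg hv1, hb, hv]
        have : (pvVals p ++ [(1 : Int)]).count v = (pvVals p).count v := by
          simp [List.count_append, Ne.symm hv1]
        rw [this]

theorem loopB (tl : List Char) : ∀ (p : List Char) (freq : PySem.Dict Char Int)
    (bucket : PySem.Dict Int Int) (r : Int),
    (∀ x, freq.getD x 0 = ((p.count x : Int))) →
    (∀ v, bucket.getD v 0 = (((pvVals p).count v : Int))) →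
    (tl.foldl beautyStepB (freq, bucket, pvMax (pvVals p), pvMin (pvVals p), r)).2.2.2.2 =
      pvRef p tl r := by
  induction tl with
  | nil => intro p freq bucket r _ _; rfl
  | cons c tl ih =>
    intro p freq bucket r hf hb
    obtain ⟨freq', bucket', hstep, hf', hb'⟩ := stepB_spec p c freq bucket r hf hb
    simp only [List.foldl_cons, hstep]
    rw [ih (p ++ [c]) freq' bucket' _ hf' hb']
    rfl

-- ===== VERDICT (by name: the statement is the Claim_ definition above) =====
theorem beauty_max_spec : Claim_equal_beauty_max := by
  intro s _
  unfold Spec_beauty_max beauty_max beauty_max_alt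
  apply PySem.List.foldl_congr_mem
  intro r i hi
  have hi0 : 0 ≤ i := ((PySem.List.mem_pyRange_one).mp hi).1
  rw [PySem.List.foldl_pyRange_pyGetD s.toList ' ' beautyStepA (PySem.Dict.empty, r) hi0,
      PySem.List.slice_from s.toList hi0]
  exact (loopA (s.toList.drop i.toNat) [] r).trans
    (loopB (s.toList.drop i.toNat) [] PySem.Dict.empty PySem.Dict.empty r
      (fun x => rfl) (fun v => rfl)).symm
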